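-- pv_equiv track=rewrite | github.com/BLZbanme/leetcode | 2001-2100/2001-2050/2047NumberOfValidWordsInASentence/demo.py | check
-- ===== SOURCE A (Python) =====
-- def check(str):
--     if not str:
--         return False
--     hasLine = False
--     hasPoint = False
--     for i, ch in enumerate(str):
--         if ord("0") <= ord(ch) <= ord("9"):
--             return False
--         if ch == '-':
--             if hasLine or i == 0 or i == len(str) - 1 or( not isChar(str[i - 1]) or  not isChar(str[i + 1])):
--                 return False
--             hasLine = True
--         if ch == "." or ch == "!" or ch == ",":
--             if hasPoint or i != len(str) - 1:
--                 return False
--             hasPoint = True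
--     return True
--
-- def isChar(str):
--     return ord("a") <= ord(str) <= ord("z")
-- ===== SOURCE B (Python) =====
-- def check(str):
--     if not str:
--         return False
--     n = len(str)
--     if any(ord("0") <= ord(ch) <= ord("9") for ch in str):
--         return False
--     hyphens = [i for i, ch in enumerate(str) if ch == '-']
--     puncts = [i for i, ch in enumerate(str) if ch in ".!,"]
--     if len(hyphens) > 1 or len(puncts) > 1:
--         return False
--     if hyphens:
--         i = hyphens[0]
--         if i == 0 or i == n - 1 or not isChar(str[i - 1]) or not isChar(str[i + 1]):
--             return False
--     if puncts and puncts[0] != n - 1: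
--         return False
--     return True
--
-- def isChar(str):
--     return ord("a") <= ord(str) <= ord("z")
-- ===== Notes on version B (the rewrite author's own statement) =====
-- stated objective: simpler
-- what changed: Replaces A's single stateful scan with hasLine/hasPoint flags and early returns by a declarative decomposition: one digit scan, then the lists of hyphen and punctuation indices, each validated independently.
import Mathlib
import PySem

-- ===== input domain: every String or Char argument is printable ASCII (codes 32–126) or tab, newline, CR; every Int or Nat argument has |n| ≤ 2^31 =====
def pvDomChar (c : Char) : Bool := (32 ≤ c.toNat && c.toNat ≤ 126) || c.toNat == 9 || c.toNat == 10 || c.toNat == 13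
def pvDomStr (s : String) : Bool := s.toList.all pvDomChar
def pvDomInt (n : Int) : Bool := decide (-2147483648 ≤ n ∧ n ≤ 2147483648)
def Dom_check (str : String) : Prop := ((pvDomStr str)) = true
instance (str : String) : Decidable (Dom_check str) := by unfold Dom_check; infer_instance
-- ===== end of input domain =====

-- B replaces A's stateful single loop (flags hasLine/hasPoint, early returns) by a
-- declarative decomposition: one digit scan, then the lists of hyphen and punctuation
-- indices, each validated on its own (objective: simpler).

-- ===== PORT A =====
def isCharL (c : Char) : Bool := decide ('a'.toNat ≤ c.toNat ∧ c.toNat ≤ 'z'.toNat)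
def isDigitL (c : Char) : Bool := decide ('0'.toNat ≤ c.toNat ∧ c.toNat ≤ '9'.toNat)
def isPunctL (c : Char) : Bool := c == '.' || c == '!' || c == ','

-- str[i-1] / str[i+1]: every use in A is guarded so that 1 ≤ i ≤ len-2 when the value
-- matters, hence getD is exact there.
def charAt (cs : List Char) (i : Nat) : Char := cs.getD i ' '

def checkLoop (full : List Char) (n : Nat) : List Char → Nat → Bool → Bool → Bool
  | [], _, _, _ => true
  | ch :: rest, i, hasLine, hasPoint =>
    if isDigitL ch then false
    else if ch == '-' then
      (if hasLine || i == 0 || i == n - 1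
          || (!isCharL (charAt full (i - 1)) || !isCharL (charAt full (i + 1))) then false
       else checkLoop full n rest (i + 1) true hasPoint)
    else if isPunctL ch then
      (if hasPoint || i != n - 1 then false
       else checkLoop full n rest (i + 1) hasLine true)
    else checkLoop full n rest (i + 1) hasLine hasPoint

def check (str : String) : Bool :=
  let cs := str.toList
  if cs.isEmpty then false
  else checkLoop cs cs.length cs 0 false false

-- ===== PORT B =====
def check_alt (str : String) : Bool :=
  let cs := str.toList
  let n := cs.length
  if cs.isEmpty then false
  else if cs.any isDigitL then false
  else
    let hyphens := ((PySem.List.enumerate cs).filter (fun p => p.2 == '-')).map (·.1)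
    let puncts := ((PySem.List.enumerate cs).filter (fun p => isPunctL p.2)).map (·.1)
    if hyphens.length > 1 || puncts.length > 1 then false
    else if (match hyphens with
             | [] => false
             | i :: _ =>
               i == 0 || i == (n : Int) - 1
               || !isCharL (PySem.List.pyGetD cs (i - 1) ' ')
               || !isCharL (PySem.List.pyGetD cs (i + 1) ' ')) then false
    else if (match puncts with
             | [] => false
             | p :: _ => p != (n : Int) - 1) then false
    else true

-- ===== PRECONDITION & SPEC =====
def Spec_check (str : String) (out : Bool) : Prop := out = check_alt str
instance (str : String) (out : Bool) : Decidable (Spec_check str out) := by unfold Spec_check; infer_instance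

-- ===== CLAIM (what is proved, stated in full; the proofs are below) =====
def Claim_equal_check : Prop := ∀ (str : String), Dom_check str → Spec_check str (check str)


-- ===== LEMMAS AND PROOFS =====

/-- neighbour condition A imposes on a hyphen at index `j`. -/
def hyphOk (cs : List Char) (j : Nat) : Bool :=
  !(j == 0) && !(j == cs.length - 1)
  && isCharL (cs.getD (j - 1) ' ') && isCharL (cs.getD (j + 1) ' ')

/-- per-index condition both programs enforce. -/
def okAt (cs : List Char) (j : Nat) : Bool :=
  !isDigitL (cs.getD j ' ')
  && (!(cs.getD j ' ' == '-') || hyphOk cs j)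
  && (!isPunctL (cs.getD j ' ') || j == cs.length - 1)

lemma loop_inv (cs : List Char) : ∀ (k i : Nat) (hl hp : Bool), i + k = cs.length →
    checkLoop cs cs.length (cs.drop i) i hl hp =
      ((List.range' i k).all (okAt cs)
       && Nat.ble ((List.range' i k).countP (fun j => cs.getD j ' ' == '-')
                    + (if hl then 1 else 0)) 1
       && (!hp || !(List.range' i k).any (fun j => isPunctL (cs.getD j ' ')))) := by
  intro k
  induction k with
  | zero =>
    intro i hl hp h
    have hd : cs.drop i = [] := List.drop_eq_nil_of_le (by omega)
    rw [hd]
    simp [checkLoop, List.range']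
    cases hl <;> simp
  | succ k ih =>
    intro i hl hp h
    have hi : i < cs.length := by omega
    have hd : cs.drop i = cs[i] :: cs.drop (i + 1) := (List.getElem_cons_drop hi).symm
    have hgd : cs[i]?.getD ' ' = cs[i] := by simp [List.getElem?_eq_getElem hi]
    rw [hd]
    show checkLoop cs cs.length (cs[i] :: cs.drop (i+1)) i hl hp = _
    rw [checkLoop]
    have hrange : List.range' i (k+1) = i :: List.range' (i+1) k := rfl
    by_cases h1 : isDigitL cs[i] = true
    · rw [if_pos h1]
      have hoki : okAt cs i = false := by simp [okAt, hgd, h1]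
      rw [hrange, List.all_cons, hoki]
      simp
    · rw [if_neg h1]
      by_cases h2 : cs[i] = '-'
      · rw [if_pos (show (cs[i] == '-') = true by simp [h2])]
        have hnp : isPunctL cs[i] = false := by rw [h2]; decide
        have hdd : isDigitL '-' = false := by decide
        have hpd : isPunctL '-' = false := by decide
        have hP : (cs.getD i ' ' == '-') = true := by simp [hgd, h2]
        by_cases hrej : (hl || i == 0 || i == cs.length - 1
            || (!isCharL (charAt cs (i - 1)) || !isCharL (charAt cs (i + 1)))) = true
        · rw [if_pos hrej]
          rcases Bool.or_eq_true_iff.mp hrej with hrej' | hch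
          · rcases Bool.or_eq_true_iff.mp hrej' with hrej'' | hn1
            · rcases Bool.or_eq_true_iff.mp hrej'' with hhl | h0
              · -- hl = true : hyphen budget exceeded
                subst hhl
                symm
                simp only [Bool.and_eq_false_iff]
                left; right
                rw [hrange, List.countP_cons]
                simp [hgd, h2]
                rw [Bool.eq_false_iff]
                intro hble
                rw [Nat.ble_eq] at hble
                omega
              · -- i = 0
                have h0' : i = 0 := by simpa using h0
                subst h0'
                have hoki : okAt cs 0 = false := by simp [okAt, hyphOk, hgd, h2]
                rw [hrange, List.all_cons, hoki]
                simp
            · -- i = n - 1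
              have hn1' : i = cs.length - 1 := by simpa using hn1
              have hoki : okAt cs i = false := by
                simp only [okAt, hyphOk, List.getD_eq_getElem?_getD, hgd, h2]
                simp [hn1', hdd, hpd]
              rw [hrange, List.all_cons, hoki]
              simp
          · -- bad neighbour
            have hyf : hyphOk cs i = false := by
              rcases Bool.or_eq_true_iff.mp hch with hc | hc
              · have hc' : isCharL (cs.getD (i-1) ' ') = false := by simpa [charAt] using hc
                simp only [List.getD_eq_getElem?_getD] at hc'
                simp [hyphOk, hc']
              · have hc' : isCharL (cs.getD (i+1) ' ') = false := by simpa [charAt] using hc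
                simp only [List.getD_eq_getElem?_getD] at hc'
                simp [hyphOk, hc']
            have hoki : okAt cs i = false := by simp [okAt, hgd, h2, hyf]
            rw [hrange, List.all_cons, hoki]
            simp
        · rw [if_neg hrej]
          simp only [Bool.or_eq_true, not_or, Bool.not_eq_true, Bool.not_eq_eq_eq_not,
            Bool.not_false] at hrej
          obtain ⟨⟨⟨hhl, h0⟩, hn1⟩, hnb1, hnb2⟩ := hrej
          have hc1 : isCharL (cs[i-1]?.getD ' ') = true := by
            simpa [charAt] using hnb1
          have hc2 : isCharL (cs[i+1]?.getD ' ') = true := by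
            simpa [charAt] using hnb2
          have hok : okAt cs i = true := by
            simp only [okAt, hyphOk, List.getD_eq_getElem?_getD, hgd, h2]
            simp [h0, hn1, hc1, hc2, hdd, hpd]
          rw [ih (i+1) true hp (by omega)]
          rw [hrange, List.countP_cons, List.all_cons, List.any_cons, hhl]
          simp [hok, hP, hgd, h2, hpd]
      · rw [if_neg (show ¬ (cs[i] == '-') = true by simp [h2])]
        have hnd : isDigitL cs[i] = false := by simpa using h1
        have hP : (cs.getD i ' ' == '-') = false := by simp [hgd, h2]
        by_cases h3 : isPunctL cs[i] = true
        · rw [if_pos h3]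
          by_cases hrej : (hp || i != cs.length - 1) = true
          · rw [if_pos hrej]
            rcases Bool.or_eq_true_iff.mp hrej with hhp | hne
            · subst hhp
              symm
              simp only [Bool.and_eq_false_iff]
              right
              rw [hrange]
              simp [List.any_cons, hgd, h3]
            · have hne' : i ≠ cs.length - 1 := by simpa using hne
              have hoki : okAt cs i = false := by
                simp only [okAt, List.getD_eq_getElem?_getD, hgd]
                simp [h3, hne']
              rw [hrange, List.all_cons, hoki]
              simp
          · rw [if_neg hrej]
            simp only [Bool.or_eq_true, not_or, Bool.not_eq_true, bne_eq_false_iff_eq] at hrej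
            obtain ⟨hhp, heq⟩ := hrej
            have hbe : (i == cs.length - 1) = true := by simp [heq]
            have hok : okAt cs i = true := by
              simp only [okAt, hyphOk, List.getD_eq_getElem?_getD, hgd]
              simp [hnd, h2, hbe]
            rw [ih (i+1) hl true (by omega)]
            have hk0 : k = 0 := by omega
            subst hk0
            rw [hrange, List.countP_cons, List.all_cons, List.any_cons, hhp]
            simp [hok, h2, hgd, h3, List.range']
        · rw [if_neg h3]
          have h3' : isPunctL cs[i] = false := by simpa using h3
          have hok : okAt cs i = true := by
            simp only [okAt, hyphOk, List.getD_eq_getElem?_getD, hgd]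
            simp [hnd, h2, h3']
          rw [ih (i+1) hl hp (by omega)]
          rw [hrange, List.countP_cons, List.all_cons, List.any_cons]
          simp [hok, h2, hgd, h3']

def hyIdx (cs : List Char) : List Nat :=
  (List.range cs.length).filter (fun j => cs.getD j ' ' == '-')

def puIdx (cs : List Char) : List Nat :=
  (List.range cs.length).filter (fun j => isPunctL (cs.getD j ' '))

/-- shared normal form both programs are reduced to. -/
def altNat (cs : List Char) : Bool :=
  if cs.any isDigitL then false
  else if (hyIdx cs).length > 1 || (puIdx cs).length > 1 then false
  else if (match hyIdx cs with
           | [] => false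
           | j :: _ => j == 0 || j == cs.length - 1
               || !isCharL (cs.getD (j-1) ' ') || !isCharL (cs.getD (j+1) ' ')) then false
  else if (match puIdx cs with
           | [] => false
           | p :: _ => p != cs.length - 1) then false
  else true

lemma check_eq (str : String) (hne : str.toList.isEmpty = false) :
    check str = ((List.range str.toList.length).all (okAt str.toList)
      && Nat.ble ((List.range str.toList.length).countP
           (fun j => str.toList.getD j ' ' == '-')) 1) := by
  unfold check
  simp only [hne, Bool.false_eq_true, if_false]
  have h0 := loop_inv str.toList str.toList.length 0 false false (by omega)
  rw [List.drop_zero] at h0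
  rw [h0, ← List.range_eq_range']
  simp

lemma enum_filter (cs : List Char) (q : Char → Bool) :
    ((PySem.List.enumerate cs).filter (fun p => q p.2)).map (·.1)
      = ((List.range cs.length).filter (fun j => q (cs.getD j ' '))).map
          (fun (j : Nat) => (j : Int)) := by
  rw [PySem.List.enumerate_eq_map_pyRange cs ' ', PySem.List.pyRange_one]
  simp [List.filter_map, Function.comp_def, List.map_map]

lemma alt_eq (str : String) (hne : str.toList.isEmpty = false) :
    check_alt str = altNat str.toList := by
  unfold check_alt altNat
  simp only [hne, Bool.false_eq_true, if_false]
  by_cases hdig : str.toList.any isDigitL = true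
  · simp [hdig]
  · have hdig' : str.toList.any isDigitL = false := by simpa using hdig
    simp only [hdig', Bool.false_eq_true, if_false]
    rw [enum_filter str.toList (fun c => c == '-'), enum_filter str.toList isPunctL]
    have hn1 : 1 ≤ str.toList.length := by
      cases hcs : str.toList with
      | nil => rw [hcs] at hne; simp at hne
      | cons a t => simp
    have hyIdx_def : (List.range str.toList.length).filter
        (fun j => str.toList.getD j ' ' == '-') = hyIdx str.toList := rfl
    have puIdx_def : (List.range str.toList.length).filter
        (fun j => isPunctL (str.toList.getD j ' ')) = puIdx str.toList := rfl
    rw [hyIdx_def, puIdx_def]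
    have hn1' : 1 ≤ str.length := by simpa using hn1
    have c0 : ∀ q : Nat, ¬ ((q : Int) + 1 = 0) := by intro q; omega
    have c1 : ∀ q : Nat, ((q : Int) = (str.length : Int) - 1) ↔ (q = str.length - 1) := by
      intro q; omega
    have c2 : ∀ q : Nat, ((q : Int) + 1 = (str.length : Int) - 1)
        ↔ (q + 1 = str.length - 1) := by
      intro q; omega
    rcases hhy : hyIdx str.toList with _ | ⟨j, t⟩ <;>
      rcases hpu : puIdx str.toList with _ | ⟨p, s⟩
    · simp
    · simp [c1]
    · by_cases hj : j = 0
      · subst hj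
        simp
      · obtain ⟨m, rfl⟩ : ∃ m, j = m + 1 := ⟨j - 1, by omega⟩
        have e2' : PySem.List.pyGetD str.toList ((m : Int) + 1 + 1) ' '
            = str.toList.getD (m + 2) ' ' := by
          rw [show ((m : Int) + 1 + 1) = ((m + 2 : Nat) : Int) by push_cast; ring,
            PySem.List.pyGetD_natCast]
        simp [e2', c0, c2]
    · by_cases hj : j = 0
      · subst hj
        simp [c1]
      · obtain ⟨m, rfl⟩ : ∃ m, j = m + 1 := ⟨j - 1, by omega⟩
        have e2' : PySem.List.pyGetD str.toList ((m : Int) + 1 + 1) ' '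
            = str.toList.getD (m + 2) ' ' := by
          rw [show ((m : Int) + 1 + 1) = ((m + 2 : Nat) : Int) by push_cast; ring,
            PySem.List.pyGetD_natCast]
        simp [e2', c0, c1, c2]

lemma nodup_le_one {l : List Nat} (a : Nat) (hn : l.Nodup) (h : ∀ x ∈ l, x = a) :
    l.length ≤ 1 := by
  match l with
  | [] => simp
  | [x] => simp
  | x :: y :: r =>
    exfalso
    have hx : x = a := h x (by simp)
    have hy : y = a := h y (by simp)
    rw [List.nodup_cons] at hn
    exact hn.1 (by simp [hx, hy])

lemma core (cs : List Char) (hne : cs.isEmpty = false) :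
    ((List.range cs.length).all (okAt cs)
      && Nat.ble ((List.range cs.length).countP (fun j => cs.getD j ' ' == '-')) 1)
    = altNat cs := by
  unfold altNat
  by_cases hdig : cs.any isDigitL = true
  · rw [if_pos hdig]
    obtain ⟨c, hc, hcd⟩ := List.any_eq_true.mp hdig
    obtain ⟨jj, hj, rfl⟩ := List.mem_iff_getElem.mp hc
    have hg : cs[jj]?.getD ' ' = cs[jj] := by simp [List.getElem?_eq_getElem hj]
    have hall : (List.range cs.length).all (okAt cs) = false := by
      rw [List.all_eq_false]
      exact ⟨jj, by simp [hj], by simp [okAt, hg, hcd]⟩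
    rw [hall]
    simp
  · have hnod : ∀ j, j < cs.length → isDigitL (cs.getD j ' ') = false := by
      intro j hj
      rw [List.getD_eq_getElem cs ' ' hj]
      by_contra hcon
      exact hdig (List.any_eq_true.mpr ⟨cs[j], List.getElem_mem hj, by simpa using hcon⟩)
    rw [if_neg hdig]
    have hcnt : (List.range cs.length).countP (fun j => cs.getD j ' ' == '-')
        = (hyIdx cs).length := List.countP_eq_length_filter
    have hsplit : (List.range cs.length).all (okAt cs)
        = ((hyIdx cs).all (fun j => hyphOk cs j)
           && (puIdx cs).all (fun j => j == cs.length - 1)) := by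
      apply Bool.coe_iff_coe.mp
      simp only [Bool.and_eq_true, List.all_eq_true, hyIdx, puIdx, List.mem_filter,
        List.mem_range, okAt, Bool.or_eq_true, Bool.not_eq_eq_eq_not, Bool.not_true,
        beq_iff_eq]
      constructor
      · intro H
        refine ⟨fun j hj => ?_, fun j hj => ?_⟩
        · rcases (H j hj.1).1.2 with hcon | hok
          · exact absurd (by simpa using hj.2) (by simpa using hcon)
          · exact hok
        · rcases (H j hj.1).2 with hcon | hend
          · exact absurd (by simpa using hj.2) (by simpa using hcon)
          · simp [hend]
      · intro ⟨H1, H2⟩ j hj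
        refine ⟨⟨by simpa using hnod j hj, ?_⟩, ?_⟩
        · by_cases hc : cs.getD j ' ' = '-'
          · exact Or.inr (H1 j ⟨hj, by simpa using hc⟩)
          · exact Or.inl (by simpa using hc)
        · by_cases hc : isPunctL (cs.getD j ' ') = true
          · exact Or.inr (by simpa using H2 j ⟨hj, hc⟩)
          · exact Or.inl (by simpa using hc)
    rw [hsplit, hcnt]
    by_cases hh2 : (hyIdx cs).length > 1
    · rw [if_pos (by simp [hh2])]
      have hble : Nat.ble (hyIdx cs).length 1 = false := by
        rw [Bool.eq_false_iff]
        intro hb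
        rw [Nat.ble_eq] at hb
        omega
      rw [hble]
      simp
    · by_cases hp2 : (puIdx cs).length > 1
      · rw [if_pos (by simp [hp2])]
        have hnodup : (puIdx cs).Nodup := (List.nodup_range).filter _
        have hpall : (puIdx cs).all (fun j => j == cs.length - 1) = false := by
          rw [Bool.eq_false_iff]
          intro hall
          have := nodup_le_one (cs.length - 1) hnodup
            (fun x hx => by simpa using List.all_eq_true.mp hall x hx)
          omega
        rw [hpall]
        simp
      · rw [if_neg (by simp; omega)]
        have hble : Nat.ble (hyIdx cs).length 1 = true := by
          rw [Nat.ble_eq]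
          omega
        rw [hble]
        have ht : ∀ j t, hyIdx cs = j :: t → t = [] := by
          intro j t hhy
          rw [hhy] at hh2
          cases t
          · rfl
          · simp at hh2
        have hs : ∀ p s, puIdx cs = p :: s → s = [] := by
          intro p s hpu
          rw [hpu] at hp2
          cases s
          · rfl
          · simp at hp2
        rcases hhy : hyIdx cs with _ | ⟨j, t⟩ <;> rcases hpu : puIdx cs with _ | ⟨p, s⟩
        · simp
        · rw [hs p s hpu]
          by_cases hpc : p = cs.length - 1 <;> simp [bne, hpc]
        · rw [ht j t hhy]
          simp only [List.all_cons, List.all_nil, Bool.and_true, hyphOk]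
          by_cases hc0 : j = 0 <;> by_cases hcn : j = cs.length - 1 <;>
            cases hc1 : isCharL (cs.getD (j-1) ' ') <;>
              cases hc2 : isCharL (cs.getD (j+1) ' ') <;> simp [hc0, hcn, hc1, hc2]
        · rw [ht j t hhy, hs p s hpu]
          simp only [List.all_cons, List.all_nil, Bool.and_true, hyphOk]
          by_cases hc0 : j = 0 <;> by_cases hcn : j = cs.length - 1 <;>
            by_cases hpc : p = cs.length - 1 <;>
              cases hc1 : isCharL (cs.getD (j-1) ' ') <;>
                cases hc2 : isCharL (cs.getD (j+1) ' ') <;>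
                  simp [bne, hc0, hcn, hpc, hc1, hc2]

-- ===== VERDICT (by name: the statement is the Claim_ definition above) =====
theorem check_spec : Claim_equal_check := by
  unfold Claim_equal_check Spec_check
  intro str _
  by_cases hne : str.toList.isEmpty = true
  · unfold check check_alt
    simp [hne]
  · have hne' : str.toList.isEmpty = false := by simpa using hne
    rw [check_eq str hne', alt_eq str hne']
    exact core str.toList hne'
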